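-- pv_equiv track=rewrite | github.com/regob/adventofcode | python/2024/day5.py | print_is_in_order
-- ===== SOURCE A (Python) =====
-- def print_is_in_order(nums, come_after):
--     num_seen = set()
--     for x in nums:
--         for x_dep in come_after.get(x, []):
--             if x_dep in num_seen:
--                 return False
--         num_seen.add(x)
--     return True
-- ===== SOURCE B (Python) =====
-- def print_is_in_order(nums, come_after):
--     firstpos = {}
--     for i, n in enumerate(nums):
--         if n not in firstpos:
--             firstpos[n] = i
--     for j, x in enumerate(nums):
--         for dep in come_after.get(x, []):
--             if dep in firstpos and firstpos[dep] < j: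
--                 return False
--     return True
-- ===== Notes on version B (the rewrite author's own statement) =====
-- stated objective: alternative
-- what changed: Replaces the incremental 'seen' set threaded through one pass with a precomputed first-occurrence position table built in one pass and a separate read-only checking pass comparing positions.
import Mathlib
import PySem

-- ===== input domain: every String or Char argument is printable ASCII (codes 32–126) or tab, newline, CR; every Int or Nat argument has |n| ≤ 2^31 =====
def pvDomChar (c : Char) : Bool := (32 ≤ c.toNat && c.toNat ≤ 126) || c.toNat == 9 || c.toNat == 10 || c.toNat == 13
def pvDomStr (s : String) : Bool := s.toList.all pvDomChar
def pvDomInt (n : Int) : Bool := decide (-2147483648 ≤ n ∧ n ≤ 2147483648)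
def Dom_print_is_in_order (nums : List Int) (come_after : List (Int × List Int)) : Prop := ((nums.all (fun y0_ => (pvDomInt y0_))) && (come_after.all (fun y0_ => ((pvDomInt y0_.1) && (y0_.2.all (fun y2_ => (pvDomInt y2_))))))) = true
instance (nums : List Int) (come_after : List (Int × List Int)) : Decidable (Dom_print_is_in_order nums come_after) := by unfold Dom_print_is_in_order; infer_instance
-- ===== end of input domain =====

-- B replaces A's incremental 'seen' set with a precomputed first-occurrence position table
-- and a separate read-only checking pass (objective: alternative decomposition, same cost).

-- ===== PORT A =====
def piioGo (ca : PySem.Dict Int (List Int)) : List Int → PySem.Set Int → Bool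
  | [], _ => true
  | x :: rest, seen =>
    if (ca.getD x []).any (fun d => PySem.Set.contains seen d) then false
    else piioGo ca rest (PySem.Set.add seen x)

def print_is_in_order (nums : List Int) (come_after : List (Int × List Int)) : Bool :=
  piioGo (PySem.Dict.mk come_after) nums PySem.Set.empty

-- ===== PORT B =====
def piioFirstpos (nums : List Int) : PySem.Dict Int Int :=
  (PySem.List.enumerate nums).foldl
    (fun fp p => if fp.contains p.2 then fp else fp.insert p.2 p.1)
    PySem.Dict.empty

def print_is_in_order_alt (nums : List Int) (come_after : List (Int × List Int)) : Bool :=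
  let ca := PySem.Dict.mk come_after
  let fp := piioFirstpos nums
  (PySem.List.enumerate nums).all (fun q =>
    (ca.getD q.2 []).all (fun d =>
      match fp.get? d with
      | some i => !decide (i < q.1)
      | none => true))

-- ===== PRECONDITION & SPEC =====
def Spec_print_is_in_order (nums : List Int) (come_after : List (Int × List Int)) (out : Bool) : Prop := out = print_is_in_order_alt nums come_after
instance (nums : List Int) (come_after : List (Int × List Int)) (out : Bool) : Decidable (Spec_print_is_in_order nums come_after out) := by unfold Spec_print_is_in_order; infer_instance

-- ===== CLAIM (what is proved, stated in full; the proofs are below) =====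
def Claim_equal_print_is_in_order : Prop := ∀ (nums : List Int) (come_after : List (Int × List Int)), Dom_print_is_in_order nums come_after → Spec_print_is_in_order nums come_after (print_is_in_order nums come_after)

-- ===== LEMMAS AND PROOFS =====

-- The first-occurrence table's lookup is the first index of the key (generalized over the
-- enumeration start offset and the accumulator dictionary).
lemma piioFirstpos_foldl_get? (l : List Int) : ∀ (k : Int) (d0 : PySem.Dict Int Int) (d : Int),
    ((PySem.List.enumerate l k).foldl
      (fun fp p => if fp.contains p.2 then fp else fp.insert p.2 p.1) d0).get? d
    = (d0.get? d).or ((l.findIdx? (fun y => y == d)).map (fun n => k + n)) := by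
  induction l with
  | nil => intro k d0 d; simp [PySem.List.enumerate]
  | cons x l ih =>
    intro k d0 d
    rw [PySem.List.enumerate_cons, List.foldl_cons, ih, List.findIdx?_cons]
    by_cases hxd : x = d
    · subst hxd
      simp only [beq_self_eq_true, if_true]
      by_cases hc : d0.contains x = true
      · have hs : (d0.get? x).isSome := by
          rw [← PySem.Dict.contains_eq_isSome_get?]; exact hc
        obtain ⟨v, hv⟩ := Option.isSome_iff_exists.mp hs
        simp [hc, hv]
      · have hn : d0.get? x = none := by
          rw [PySem.Dict.get?_eq_none_iff_contains]; simpa using hc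
        simp only [Bool.not_eq_true] at hc
        simp [hc, hn, PySem.Dict.get?_insert_self]
    · have hbeq : (x == d) = false := by simp [hxd]
      have hins : ∀ v : Int, (d0.insert x v).get? d = d0.get? d := fun v =>
        PySem.Dict.get?_insert_of_ne d0 v (Ne.symm hxd)
      cases hfi : List.findIdx? (fun y => y == d) l with
      | none => by_cases hc : d0.contains x = true <;> simp [hc, hbeq, hins]
      | some n =>
        have harith : ((n + 1 : Nat) : Int) = 1 + n := by push_cast; ring
        by_cases hc : d0.contains x = true <;>
          simp [hc, hbeq, hins, harith, add_assoc]

-- Membership in a prefix, phrased through the first index in the whole list.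
lemma mem_take_iff_findIdx (l : List Int) : ∀ (j : Nat) (d : Int),
    d ∈ l.take j ↔ ∃ n, l.findIdx? (fun y => y == d) = some n ∧ n < j := by
  induction l with
  | nil => intro j d; simp
  | cons x l ih =>
    intro j d
    cases j with
    | zero => simp
    | succ j' =>
      rw [List.take_succ_cons, List.findIdx?_cons]
      by_cases hxd : x = d
      · subst hxd; simp
      · have hbeq : (x == d) = false := by simp [hxd]
        simp only [hbeq, Bool.false_eq_true, if_false, List.mem_cons]
        rw [ih j' d]
        constructor
        · rintro (h | ⟨n, hn, hlt⟩)
          · exact absurd h.symm hxd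
          · exact ⟨n + 1, by simp [hn], by omega⟩
        · rintro ⟨m, hm, hlt⟩
          rcases Option.map_eq_some_iff.mp hm with ⟨n, hn, rfl⟩
          exact Or.inr ⟨n, hn, by omega⟩

-- Main bridge: A's loop over the remaining suffix, with the seen-set holding exactly the
-- already-processed prefix, equals B's positional check over the same suffix.
lemma piioGo_eq (ca : PySem.Dict Int (List Int)) (nums : List Int) :
    ∀ (rest p : List Int), nums = p ++ rest →
    piioGo ca rest (PySem.Set.ofList p)
    = (PySem.List.enumerate rest (p.length : Int)).all (fun q =>
        (ca.getD q.2 []).all (fun d =>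
          match (piioFirstpos nums).get? d with
          | some i => !decide (i < q.1)
          | none => true)) := by
  intro rest
  induction rest with
  | nil => intro p h; simp [piioGo, PySem.List.enumerate]
  | cons x rest ih =>
    intro p h
    rw [PySem.List.enumerate_cons, List.all_cons]
    have hfp : ∀ d : Int, (piioFirstpos nums).get? d
        = (nums.findIdx? (fun y => y == d)).map (fun n => (n : Int)) := by
      intro d
      unfold piioFirstpos
      rw [piioFirstpos_foldl_get? nums 0 PySem.Dict.empty d]
      simp
    have hkey : ∀ d : Int,
        PySem.Set.contains (PySem.Set.ofList p) d
        = !(match (piioFirstpos nums).get? d with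
            | some i => !decide (i < ((p.length : Nat) : Int))
            | none => true) := by
      intro d
      rw [hfp]
      have hp : nums.take p.length = p := by rw [h, List.take_left]
      have hmem : d ∈ p ↔ ∃ n, nums.findIdx? (fun y => y == d) = some n ∧ n < p.length := by
        have := mem_take_iff_findIdx nums p.length d
        rwa [hp] at this
      cases hfi : nums.findIdx? (fun y => y == d) with
      | none =>
        have hnd : d ∉ p := by rw [hmem]; rintro ⟨n, hn, -⟩; simp [hfi] at hn
        simp
        exact hnd
      | some n =>
        simp
        rw [hmem]
        constructor
        · rintro ⟨n', hn', hlt⟩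
          rw [hfi] at hn'
          injection hn' with hn''
          omega
        · intro hlt
          exact ⟨n, hfi, hlt⟩
    have hc : (ca.getD x []).any (fun d => PySem.Set.contains (PySem.Set.ofList p) d)
        = !((ca.getD x []).all (fun d =>
            match (piioFirstpos nums).get? d with
            | some i => !decide (i < ((p.length : Nat) : Int))
            | none => true)) := by
      have h1 : (ca.getD x []).any (fun d => PySem.Set.contains (PySem.Set.ofList p) d)
          = (ca.getD x []).any (fun d => !(match (piioFirstpos nums).get? d with
              | some i => !decide (i < ((p.length : Nat) : Int))
              | none => true)) := congrArg _ (funext hkey)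
      rw [h1, List.any_eq_not_all_not]
      simp
    have hih := ih (p ++ [x]) (by simp [h])
    rw [PySem.Set.ofList_append_singleton] at hih
    show (if (ca.getD x []).any (fun d => PySem.Set.contains (PySem.Set.ofList p) d) then false
          else piioGo ca rest (PySem.Set.add (PySem.Set.ofList p) x)) = _
    rw [hc, hih]
    have hlen : ((p ++ [x]).length : Int) = (p.length : Int) + 1 := by simp
    rw [hlen]
    cases hF : (ca.getD x []).all (fun d =>
        match (piioFirstpos nums).get? d with
        | some i => !decide (i < ((p.length : Nat) : Int))
        | none => true) <;> simp

-- ===== VERDICT (by name: the statement is the Claim_ definition above) =====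
theorem print_is_in_order_spec : Claim_equal_print_is_in_order := by
  intro nums come_after _
  unfold Spec_print_is_in_order print_is_in_order print_is_in_order_alt
  simpa using piioGo_eq (PySem.Dict.mk come_after) nums nums [] rfl
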